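-- pv_equiv track=rewrite | github.com/devlovasit-source/cloudbackend | brain/tone/tone_engine.py | _enforce_max_exclamations
-- ===== SOURCE A (Python) =====
-- def _enforce_max_exclamations(text: str, max_exc: int = 1) -> str:
--     if max_exc < 0:
--         return text
--     count = 0
--     out = []
--     for ch in text:
--         if ch == "!":
--             if count < max_exc:
--                 out.append(ch)
--             count += 1
--         else:
--             out.append(ch)
--     return "".join(out)
-- ===== SOURCE B (Python) =====
-- def _enforce_max_exclamations(text: str, max_exc: int = 1) -> str:
--     if max_exc < 0:
--         return text
--     parts = text.split("!")
--     return "!".join(parts[:max_exc + 1]) + "".join(parts[max_exc + 1:])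
-- ===== Notes on version B (the rewrite author's own statement) =====
-- stated objective: simpler
-- what changed: Replaced the per-character counter-and-accumulator loop with a split of the text on the exclamation-mark delimiter, rejoining the first max_exc+1 segments with the delimiter and concatenating the remaining segments without separators.
import Mathlib
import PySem

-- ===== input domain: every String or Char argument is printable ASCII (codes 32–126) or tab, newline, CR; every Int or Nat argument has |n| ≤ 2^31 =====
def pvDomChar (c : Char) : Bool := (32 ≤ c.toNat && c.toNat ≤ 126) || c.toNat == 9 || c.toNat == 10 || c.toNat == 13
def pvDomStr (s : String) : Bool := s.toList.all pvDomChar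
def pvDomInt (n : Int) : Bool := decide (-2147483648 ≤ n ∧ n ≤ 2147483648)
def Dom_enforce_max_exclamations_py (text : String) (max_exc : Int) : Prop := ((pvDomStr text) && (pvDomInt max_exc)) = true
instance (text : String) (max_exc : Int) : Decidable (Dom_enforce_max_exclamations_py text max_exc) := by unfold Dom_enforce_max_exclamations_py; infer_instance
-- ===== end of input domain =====

-- B replaces A's per-character counter loop by a split-on-'!' / rejoin decomposition (objective: simpler).

-- ===== PORT A =====
-- per-character loop with a count and an output accumulator, as in the Python
def enforce_max_exclamations_py (text : String) (max_exc : Int) : String :=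
  if max_exc < 0 then text
  else
    let st := text.toList.foldl
      (fun (s : Int × List Char) ch =>
        if ch = '!' then
          (s.1 + 1, if s.1 < max_exc then s.2 ++ [ch] else s.2)
        else
          (s.1, s.2 ++ [ch]))
      (0, [])
    String.mk st.2

-- ===== PORT B =====
-- split on '!', rejoin the first max_exc+1 parts with '!', concatenate the rest
def enforce_max_exclamations_py_alt (text : String) (max_exc : Int) : String :=
  if max_exc < 0 then text
  else
    let parts := PySem.Chars.splitOn text.toList ['!']
    String.mk
      (PySem.Chars.join ['!'] (PySem.List.slice parts none (some (max_exc + 1))) ++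
       PySem.Chars.join [] (PySem.List.slice parts (some (max_exc + 1)) none))

-- ===== PRECONDITION & SPEC =====
def Spec_enforce_max_exclamations_py (text : String) (max_exc : Int) (out : String) : Prop := out = enforce_max_exclamations_py_alt text max_exc
instance (text : String) (max_exc : Int) (out : String) : Decidable (Spec_enforce_max_exclamations_py text max_exc out) := by unfold Spec_enforce_max_exclamations_py; infer_instance

-- ===== CLAIM (what is proved, stated in full; the proofs are below) =====
def Claim_equal_enforce_max_exclamations_py : Prop := ∀ (text : String) (max_exc : Int), Dom_enforce_max_exclamations_py text max_exc → Spec_enforce_max_exclamations_py text max_exc (enforce_max_exclamations_py text max_exc)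

-- ===== LEMMAS AND PROOFS =====

-- clean split on '!' (proof-side characterisation of PySem.Chars.splitOn · ['!'])
def pvSplit : List Char → List (List Char)
  | [] => [[]]
  | c :: t =>
    if c = '!' then [] :: pvSplit t
    else
      match pvSplit t with
      | h :: r => (c :: h) :: r
      | [] => [[c]]

-- keep a '!' while the remaining budget r is positive; other chars always kept
def pvKeep : List Char → Int → List Char
  | [], _ => []
  | c :: t, r =>
    if c = '!' then (if 0 < r then ['!'] else []) ++ pvKeep t (r - 1)
    else c :: pvKeep t r

lemma pvSplit_ne_nil (l : List Char) : pvSplit l ≠ [] := by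
  cases l with
  | nil => simp [pvSplit]
  | cons c t =>
    simp only [pvSplit]
    split
    · simp
    · cases h : pvSplit t <;> simp

def pvConsPre (p : List Char) : List (List Char) → List (List Char)
  | [] => [p]
  | h :: r => (p ++ h) :: r

lemma pvGo_eq (l : List Char) : ∀ (fuel : Nat) (cur : List Char) (acc : List (List Char)),
    l.length ≤ fuel →
    PySem.Chars.splitOn.go ['!'] fuel l cur acc
      = acc.reverse ++ pvConsPre cur.reverse (pvSplit l) := by
  induction l with
  | nil =>
      intro fuel cur acc _
      cases fuel <;> simp [PySem.Chars.splitOn.go, pvSplit, pvConsPre]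
  | cons c t ih =>
      intro fuel cur acc hlen
      cases fuel with
      | zero => simp at hlen
      | succ fu =>
        by_cases hc : c = '!'
        · subst hc
          rw [show PySem.Chars.splitOn.go ['!'] (fu+1) ('!' :: t) cur acc
                = PySem.Chars.splitOn.go ['!'] fu t [] (cur.reverse :: acc) by
              simp [PySem.Chars.splitOn.go, List.isPrefixOf]]
          rw [ih fu [] (cur.reverse :: acc) (by simpa using Nat.lt_succ_iff.mp (by simpa using hlen))]
          simp only [pvSplit, reduceIte]
          cases h : pvSplit t with
          | nil => exact absurd h (pvSplit_ne_nil t)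
          | cons h' r => simp [pvConsPre]
        · rw [show PySem.Chars.splitOn.go ['!'] (fu+1) (c :: t) cur acc
                = PySem.Chars.splitOn.go ['!'] fu t (c :: cur) acc by
              simp only [PySem.Chars.splitOn.go, List.isPrefixOf, Bool.and_eq_true, beq_iff_eq]
              rw [if_neg (fun hp : ('!' = c ∧ True) => hc hp.1.symm)]]
          rw [ih fu (c :: cur) acc (by simpa using Nat.lt_succ_iff.mp (by simpa using hlen))]
          simp only [pvSplit, if_neg hc]
          cases h : pvSplit t with
          | nil => exact absurd h (pvSplit_ne_nil t)
          | cons h' r => simp [pvConsPre]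

lemma pvSplitOn_eq (l : List Char) : PySem.Chars.splitOn l ['!'] = pvSplit l := by
  rw [PySem.Chars.splitOn, pvGo_eq l (l.length + 1) [] [] (by omega)]
  cases h : pvSplit l with
  | nil => exact absurd h (pvSplit_ne_nil l)
  | cons h' r => simp [pvConsPre]

-- A's loop computes pvKeep with remaining budget max_exc - count
lemma pvLoop_eq (m : Int) (l : List Char) : ∀ (count : Int) (out : List Char),
    (l.foldl
      (fun (s : Int × List Char) ch =>
        if ch = '!' then
          (s.1 + 1, if s.1 < m then s.2 ++ [ch] else s.2)
        else
          (s.1, s.2 ++ [ch]))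
      (count, out)).2 = out ++ pvKeep l (m - count) := by
  induction l with
  | nil => intro count out; simp [pvKeep]
  | cons c t ih =>
      intro count out
      by_cases hc : c = '!'
      · subst hc
        simp only [List.foldl_cons, pvKeep, reduceIte]
        rw [ih (count + 1)]
        by_cases hlt : count < m
        · rw [if_pos hlt, if_pos (by omega)]
          simp [show m - (count + 1) = m - count - 1 by ring]
        · rw [if_neg hlt, if_neg (by omega)]
          simp [show m - (count + 1) = m - count - 1 by ring]
      · simp only [List.foldl_cons, pvKeep, if_neg hc]
        rw [ih count]
        simp

-- dropping every '!' = pvKeep with a non-positive budget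
lemma pvFlatten_eq (l : List Char) : ∀ (r : Int), r ≤ 0 →
    (pvSplit l).flatten = pvKeep l r := by
  induction l with
  | nil => intro r _; simp [pvSplit, pvKeep]
  | cons c t ih =>
      intro r hr
      by_cases hc : c = '!'
      · subst hc
        simp only [pvSplit, reduceIte, List.flatten_cons, List.nil_append, pvKeep]
        rw [if_neg (by omega : ¬ (0:Int) < r)]
        simpa using ih (r - 1) (by omega)
      · simp only [pvSplit, if_neg hc, pvKeep, if_neg hc]
        cases h : pvSplit t with
        | nil => exact absurd h (pvSplit_ne_nil t)
        | cons h' rr =>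
            have := ih r hr
            rw [h] at this
            simpa using this

-- the split/rejoin value equals pvKeep with budget m (as a Nat)
lemma pvJoin_eq (l : List Char) : ∀ (m : Nat),
    PySem.Chars.join ['!'] ((pvSplit l).take (m + 1)) ++ ((pvSplit l).drop (m + 1)).flatten
      = pvKeep l (m : Int) := by
  induction l with
  | nil => intro m; simp [pvSplit, pvKeep, PySem.Chars.join, List.intercalate]
  | cons c t ih =>
      intro m
      by_cases hc : c = '!'
      · subst hc
        simp only [pvSplit, reduceIte, pvKeep]
        cases m with
        | zero =>
            rw [if_neg (by omega)]
            simp only [List.take_succ_cons, List.take_zero, List.drop_succ_cons, List.drop_zero,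
              PySem.Chars.join, List.intercalate, List.nil_append]
            simpa using pvFlatten_eq t (-1) (by omega)
        | succ k =>
            rw [if_pos (by push_cast; omega)]
            have hne : (pvSplit t).take (k + 1) ≠ [] := by
              cases h : pvSplit t with
              | nil => exact absurd h (pvSplit_ne_nil t)
              | cons h' r => simp
            have hjoin : PySem.Chars.join ['!'] ([] :: (pvSplit t).take (k + 1))
                = '!' :: PySem.Chars.join ['!'] ((pvSplit t).take (k + 1)) := by
              cases h : (pvSplit t).take (k + 1) with
              | nil => exact absurd h hne
              | cons h' r => simp [PySem.Chars.join, List.intercalate]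
            simp only [List.take_succ_cons, List.drop_succ_cons, hjoin, List.cons_append]
            have := ih k
            rw [this]
            simp [show ((k:Int) + 1 - 1) = (k:Int) by ring]
      · simp only [pvSplit, if_neg hc, pvKeep, if_neg hc]
        cases h : pvSplit t with
        | nil => exact absurd h (pvSplit_ne_nil t)
        | cons h' r =>
            have hjoin : PySem.Chars.join ['!'] (((c :: h') :: r).take (m + 1))
                = c :: PySem.Chars.join ['!'] ((h' :: r).take (m + 1)) := by
              cases h2 : r.take m <;>
                simp [PySem.Chars.join, List.intercalate, List.take_succ_cons, h2]
            rw [hjoin]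
            have := ih m
            rw [h] at this
            simp only [List.take_succ_cons] at this ⊢
            simp only [List.drop_succ_cons] at this ⊢
            rw [List.cons_append, this]

-- ===== VERDICT (by name: the statement is the Claim_ definition above) =====
theorem enforce_max_exclamations_py_spec : Claim_equal_enforce_max_exclamations_py := by
  intro text max_exc _
  unfold Spec_enforce_max_exclamations_py enforce_max_exclamations_py enforce_max_exclamations_py_alt
  by_cases hneg : max_exc < 0
  · simp [hneg]
  · simp only [if_neg hneg]
    rw [not_lt] at hneg
    congr 1
    rw [pvLoop_eq max_exc text.toList 0 []]
    rw [pvSplitOn_eq]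
    rw [PySem.List.slice_to _ (by omega), PySem.List.slice_from _ (by omega)]
    have hm : (max_exc + 1).toNat = max_exc.toNat + 1 := by omega
    rw [hm]
    have hjoin0 : ∀ xs : List (List Char), PySem.Chars.join [] xs = xs.flatten := by
      intro xs
      induction xs with
      | nil => simp [PySem.Chars.join, List.intercalate]
      | cons x xs ih =>
          cases xs with
          | nil => simp [PySem.Chars.join, List.intercalate, List.intersperse]
          | cons y ys =>
              simp [PySem.Chars.join, List.intercalate, List.intersperse] at ih ⊢
              simp [ih]
    rw [hjoin0]
    have := pvJoin_eq text.toList max_exc.toNat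
    rw [this]
    simp [show ((max_exc.toNat : Int)) = max_exc by omega]
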